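-- pv_equiv track=rewrite | github.com/RoyalNoa/CapiAgentes2 | Backend/src/core/semantics/semantic_similarity.py | _concepts_are_similar
-- ===== SOURCE A (Python) =====
-- def _concepts_are_similar(concept1: str, concept2: str) -> bool:
--     """Determina si dos conceptos son semánticamente similares"""
--     if concept1 == concept2:
--         return True
--
--     # Grupos de conceptos similares
--     concept_groups = [
--         {"file_operation", "document_handling", "file_management"},
--         {"content_access", "data_reading", "information_retrieval"},
--         {"data_analysis", "analytics", "reporting"},
--         {"branch_operation", "location_analysis", "office_management"}
--     ]
--
--     for group in concept_groups:
--         if concept1 in group and concept2 in group: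
--             return True
--
--     return False
-- ===== SOURCE B (Python) =====
-- _CONCEPT_GROUP_ID = {
--     "file_operation": 0, "document_handling": 0, "file_management": 0,
--     "content_access": 1, "data_reading": 1, "information_retrieval": 1,
--     "data_analysis": 2, "analytics": 2, "reporting": 2,
--     "branch_operation": 3, "location_analysis": 3, "office_management": 3,
-- }
--
--
-- def _concepts_are_similar(concept1: str, concept2: str) -> bool:
--     if concept1 == concept2:
--         return True
--     g1 = _CONCEPT_GROUP_ID.get(concept1)
--     g2 = _CONCEPT_GROUP_ID.get(concept2)
--     return g1 is not None and g1 == g2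
-- ===== Notes on version B (the rewrite author's own statement) =====
-- stated objective: idiomatic
-- what changed: Replaced the loop scanning each group-set for joint membership by a flat concept->group-id dict built once; B does two constant-time lookups and compares the group ids, so the per-group scan is gone.
import Mathlib
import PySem

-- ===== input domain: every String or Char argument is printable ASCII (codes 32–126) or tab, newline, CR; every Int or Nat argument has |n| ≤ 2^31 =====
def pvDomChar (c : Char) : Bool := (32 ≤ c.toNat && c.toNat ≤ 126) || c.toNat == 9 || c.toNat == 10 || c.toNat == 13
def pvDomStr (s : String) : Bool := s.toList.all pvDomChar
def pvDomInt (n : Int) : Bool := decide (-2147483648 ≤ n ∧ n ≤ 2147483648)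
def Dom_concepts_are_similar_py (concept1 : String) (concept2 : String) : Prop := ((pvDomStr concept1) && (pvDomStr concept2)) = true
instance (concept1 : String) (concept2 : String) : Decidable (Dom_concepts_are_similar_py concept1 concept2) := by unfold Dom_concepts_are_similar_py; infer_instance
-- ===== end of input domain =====

-- B replaces A's scan over the group-sets by one flat concept->group-id table with two lookups (idiomatic; same observable behaviour).

-- ===== PORT A =====
def pvConceptGroups : List (PySem.Set String) :=
  [PySem.Set.ofList ["file_operation", "document_handling", "file_management"],
   PySem.Set.ofList ["content_access", "data_reading", "information_retrieval"],
   PySem.Set.ofList ["data_analysis", "analytics", "reporting"],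
   PySem.Set.ofList ["branch_operation", "location_analysis", "office_management"]]

def concepts_are_similar_py (concept1 : String) (concept2 : String) : Bool :=
  if concept1 == concept2 then true
  else
    -- for group in concept_groups: if concept1 in group and concept2 in group: return True / return False
    pvConceptGroups.any (fun group => PySem.Set.contains group concept1 && PySem.Set.contains group concept2)

-- ===== PORT B =====
def pvConceptGroupId : PySem.Dict String Int := PySem.Dict.ofList
  [("file_operation", 0), ("document_handling", 0), ("file_management", 0),
   ("content_access", 1), ("data_reading", 1), ("information_retrieval", 1),
   ("data_analysis", 2), ("analytics", 2), ("reporting", 2),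
   ("branch_operation", 3), ("location_analysis", 3), ("office_management", 3)]

def concepts_are_similar_py_alt (concept1 : String) (concept2 : String) : Bool :=
  if concept1 == concept2 then true
  else
    match PySem.Dict.get? pvConceptGroupId concept1, PySem.Dict.get? pvConceptGroupId concept2 with
    | some g1, some g2 => g1 == g2
    | _, _ => false

-- ===== PRECONDITION & SPEC =====
def Spec_concepts_are_similar_py (concept1 : String) (concept2 : String) (out : Bool) : Prop := out = concepts_are_similar_py_alt concept1 concept2
instance (concept1 : String) (concept2 : String) (out : Bool) : Decidable (Spec_concepts_are_similar_py concept1 concept2 out) := by unfold Spec_concepts_are_similar_py; infer_instance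

-- ===== CLAIM (what is proved, stated in full; the proofs are below) =====
def Claim_equal_concepts_are_similar_py : Prop := ∀ (concept1 : String) (concept2 : String), Dom_concepts_are_similar_py concept1 concept2 → Spec_concepts_are_similar_py concept1 concept2 (concepts_are_similar_py concept1 concept2)

-- ===== LEMMAS AND PROOFS =====

-- the twelve grouped concepts
def pvWords : List String :=
  ["file_operation", "document_handling", "file_management",
   "content_access", "data_reading", "information_retrieval",
   "data_analysis", "analytics", "reporting",
   "branch_operation", "location_analysis", "office_management"]

lemma pv_notin_A (c1 c2 : String) (h : c1 ∉ pvWords) (hne : ¬ c1 == c2) :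
    concepts_are_similar_py c1 c2 = false := by
  simp [pvWords] at h
  simp [concepts_are_similar_py, pvConceptGroups, PySem.Set.contains, PySem.Set.ofList,
        PySem.Set.add, hne]
  simp_all

lemma pv_notin_A' (c1 c2 : String) (h : c2 ∉ pvWords) (hne : ¬ c1 == c2) :
    concepts_are_similar_py c1 c2 = false := by
  simp [pvWords] at h
  simp [concepts_are_similar_py, pvConceptGroups, PySem.Set.contains, PySem.Set.ofList,
        PySem.Set.add, hne]
  simp_all

lemma pv_table_eq : pvConceptGroupId = PySem.Dict.mk
    [("file_operation", 0), ("document_handling", 0), ("file_management", 0),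
     ("content_access", 1), ("data_reading", 1), ("information_retrieval", 1),
     ("data_analysis", 2), ("analytics", 2), ("reporting", 2),
     ("branch_operation", 3), ("location_analysis", 3), ("office_management", 3)] := by decide

lemma pv_get_none (c : String) (h : c ∉ pvWords) :
    PySem.Dict.get? pvConceptGroupId c = none := by
  simp [pvWords] at h
  rw [pv_table_eq]
  simp [PySem.Dict.get?]
  simp_all [eq_comm]

lemma pv_notin_B (c1 c2 : String) (h : c1 ∉ pvWords) (hne : ¬ c1 == c2) :
    concepts_are_similar_py_alt c1 c2 = false := by
  simp [concepts_are_similar_py_alt, hne, pv_get_none c1 h]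

lemma pv_notin_B' (c1 c2 : String) (h : c2 ∉ pvWords) (hne : ¬ c1 == c2) :
    concepts_are_similar_py_alt c1 c2 = false := by
  simp [concepts_are_similar_py_alt, hne, pv_get_none c2 h]

lemma pv_bridge (c1 c2 : String) :
    concepts_are_similar_py c1 c2 = concepts_are_similar_py_alt c1 c2 := by
  by_cases hc : c1 == c2
  · simp [concepts_are_similar_py, concepts_are_similar_py_alt, hc]
  · rcases Decidable.em (c1 ∈ pvWords) with h1 | h1
    · rcases Decidable.em (c2 ∈ pvWords) with h2 | h2
      · fin_cases h1 <;> fin_cases h2 <;> decide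
      · rw [pv_notin_A' c1 c2 h2 hc, pv_notin_B' c1 c2 h2 hc]
    · rw [pv_notin_A c1 c2 h1 hc, pv_notin_B c1 c2 h1 hc]

-- ===== VERDICT (by name: the statement is the Claim_ definition above) =====
theorem concepts_are_similar_py_spec : Claim_equal_concepts_are_similar_py := by
  intro c1 c2 _
  unfold Spec_concepts_are_similar_py
  exact pv_bridge c1 c2
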